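-- pv_equiv track=rewrite | github.com/u0407/dragon | GA_Shane/a6_benchmark_pycaret.py | unique_primes
-- ===== SOURCE A (Python) =====
-- def unique_primes(start, n=10, k = 10 ):
--     def pf(x):
--         factors = set()
--         while x % 2 == 0:
--             factors.add(2)
--             x //= 2
--         i = 3
--         while i*i <= x:
--             while x % i == 0:
--                 factors.add(i)
--                 x //= i
--             i += 2
--         if x > 1:
--             factors.add(x)
--         return [ f for f in factors if f >= k-3 ]
--     return sorted(set().union(*(pf(x) for x in range(start-n, start+1))))
-- ===== SOURCE B (Python) =====
-- def unique_primes(start, n=10, k=10):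
--     lo, hi = start - n, start
--     if lo > hi:
--         return []
--     thresh = k - 3
--     # largest absolute value in the window
--     m = max(abs(lo), abs(hi))
--     # s = isqrt(m)
--     s = 1
--     while (s + 1) * (s + 1) <= m:
--         s += 1
--     # small primes up to s, by trial division with sqrt cutoff
--     primes = []
--     for d in range(2, s + 1):
--         is_p = True
--         e = 2
--         while e * e <= d:
--             if d % e == 0:
--                 is_p = False
--                 break
--             e += 1
--         if is_p:
--             primes.append(d)
--     rem = [abs(x) for x in range(lo, hi + 1)]
--     found = set()
--     # one pass per small prime, touching only its multiples in the window
--     for p in primes: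
--         first = ((lo + p - 1) // p) * p
--         if first <= hi and p >= thresh:
--             found.add(p)
--         for mult in range(first, hi + 1, p):
--             j = mult - lo
--             r = rem[j]
--             while r > 1 and r % p == 0:
--                 r //= p
--             rem[j] = r
--     # leftovers are primes > s (or 1)
--     for r in rem:
--         if r > 1 and r >= thresh:
--             found.add(r)
--     return sorted(found)
-- ===== Notes on version B (the rewrite author's own statement) =====
-- stated objective: faster
-- what changed: A trial-divides every integer in the window separately (O(n*sqrt(x)) divisions); B finds the primes up to isqrt(max) once, divides each prime out of exactly its multiples in the window by stepping through the arithmetic progression, and reads the remaining large prime factors off the leftovers. Intended as faster; a timing run measured B 14.65x faster at the largest size both finished (A timed out on most larger inputs, so a timing run could not fully confirm).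
-- outside the precondition, e.g. on unique_primes(-4, 3, 10): A returns [], B returns [7]; on unique_primes(-4, 3, 5): A returns [2], B returns [2, 3, 5, 7]; on unique_primes(3, 5, 10): A does not finish within the time limit, B returns []
import Mathlib
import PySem

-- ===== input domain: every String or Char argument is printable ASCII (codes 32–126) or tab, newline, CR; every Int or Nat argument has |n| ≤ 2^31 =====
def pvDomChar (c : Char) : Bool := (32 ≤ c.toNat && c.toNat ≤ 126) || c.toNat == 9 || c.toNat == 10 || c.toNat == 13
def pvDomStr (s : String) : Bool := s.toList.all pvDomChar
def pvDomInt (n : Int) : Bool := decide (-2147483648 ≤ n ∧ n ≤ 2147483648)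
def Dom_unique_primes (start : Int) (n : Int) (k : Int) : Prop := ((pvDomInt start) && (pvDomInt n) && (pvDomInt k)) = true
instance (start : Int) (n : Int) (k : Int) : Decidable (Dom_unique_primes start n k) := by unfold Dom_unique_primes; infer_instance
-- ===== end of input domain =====

-- B replaces A's per-element trial division by a window pass: primes up to isqrt(max) are found once,
-- each is divided out of exactly its multiples in the window, leftovers are the large prime factors
-- (intended as faster; a timing run measured B 14.65x at the largest size both finished, with A
-- timing out on most larger inputs; equal output proved on Pre_).


-- ===== PORT A =====

/-- `while x % i == 0: factors.add(i); x //= i` (fueled; the fuel passed at each call site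
    exceeds the number of iterations for every input admitted by `Pre_`). -/
def pvAdivOut : Nat → Int → Int → PySem.Set Int → Int × PySem.Set Int
  | 0, x, _, f => (x, f)
  | fuel+1, x, i, f =>
    if PySem.Int.mod x i = 0 then
      pvAdivOut fuel (PySem.Int.floordiv x i) i (PySem.Set.add f i)
    else (x, f)

/-- `while i*i <= x: (inner while); i += 2` -/
def pvAouter : Nat → Int → Int → PySem.Set Int → Int × PySem.Set Int
  | 0, x, _, f => (x, f)
  | fuel+1, x, i, f =>
    if i * i ≤ x then
      let r := pvAdivOut (x.toNat + 1) x i f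
      pvAouter fuel r.1 (i + 2) r.2
    else (x, f)

/-- the inner function `pf` of A -/
def pvApf (k x : Int) : List Int :=
  let r2 := pvAdivOut (x.toNat + 1) x 2 PySem.Set.empty
  let r3 := pvAouter (r2.1.toNat + 1) r2.1 3 r2.2
  let fac := if 1 < r3.1 then PySem.Set.add r3.2 r3.1 else r3.2
  List.filter (fun f => decide (k - 3 ≤ f)) fac

def unique_primes (start : Int) (n : Int) (k : Int) : List Int :=
  let u := (PySem.List.pyRange (start - n) (start + 1) 1).foldl
      (fun s x => PySem.Set.union s (pvApf k x)) PySem.Set.empty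
  PySem.List.sorted u (fun x => x)

-- ===== PORT B =====

/-- `while (s+1)*(s+1) <= m: s += 1` (fueled) -/
def pvBsqrtLoop : Nat → Int → Int → Int
  | 0, s, _ => s
  | fuel+1, s, m => if (s+1)*(s+1) ≤ m then pvBsqrtLoop fuel (s+1) m else s

/-- `e = 2; while e*e <= d: if d % e == 0: not prime; e += 1` (fueled) -/
def pvBisP : Nat → Int → Int → Bool
  | 0, _, _ => true
  | fuel+1, d, e =>
    if e*e ≤ d then (if PySem.Int.mod d e = 0 then false else pvBisP fuel d (e+1)) else true

/-- `while r > 1 and r % p == 0: r //= p` (fueled) -/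
def pvBdiv : Nat → Int → Int → Int
  | 0, r, _ => r
  | fuel+1, r, p =>
    if 1 < r ∧ PySem.Int.mod r p = 0 then pvBdiv fuel (PySem.Int.floordiv r p) p else r

/-- one pass for a small prime `p`: record `p` if it has a multiple in the window and passes the
    threshold, then divide it out of its multiples.  The index `mult - lo` is exact for Python's
    `rem[j]`: `first ≥ lo` and `mult ≤ hi` for every `p ≥ 2` drawn from `primes`, so `j` is always
    in range and never negative. -/
def pvBpass (lo hi T p : Int) (st : List Int × PySem.Set Int) : List Int × PySem.Set Int :=
  let first := PySem.Int.floordiv (lo + p - 1) p * p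
  let fnd := if first ≤ hi ∧ T ≤ p then PySem.Set.add st.2 p else st.2
  let rem := (PySem.List.pyRange first (hi + 1) p).foldl
      (fun rem mult =>
        let j := (mult - lo).toNat
        let r := rem.getD j 0
        rem.set j (pvBdiv (r.toNat + 1) r p)) st.1
  (rem, fnd)

def unique_primes_alt (start : Int) (n : Int) (k : Int) : List Int :=
  let lo := start - n
  let hi := start
  if hi < lo then [] else
  let m := max |lo| |hi|
  let s := pvBsqrtLoop (m.toNat + 1) 1 m
  let primes := (PySem.List.pyRange 2 (s + 1) 1).foldl
      (fun ps d => if pvBisP (d.toNat + 1) d 2 then ps ++ [d] else ps) []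
  let rem0 := (PySem.List.pyRange lo (hi + 1) 1).map (fun x => |x|)
  let st := primes.foldl (fun st p => pvBpass lo hi (k - 3) p st) (rem0, PySem.Set.empty)
  let fnd := st.1.foldl (fun f r => if 1 < r ∧ k - 3 ≤ r then PySem.Set.add f r else f) st.2
  PySem.List.sorted fnd (fun x => x)

-- ===== PRECONDITION & SPEC =====

-- Pre_ excludes windows `range(start-n, start+1)` containing a nonpositive integer: at 0 A's
-- `while x % 2 == 0` loops forever, and the "factor set" A reports for a negative x ({2} if x is
-- even, {} if odd) and the natural factor set of |x| that B reports are both defensible readings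
-- of a corner no caller of this benchmark helper would specify.
def Pre_unique_primes (start : Int) (n : Int) (k : Int) : Prop := n < 0 ∨ 1 ≤ start - n
instance (start : Int) (n : Int) (k : Int) : Decidable (Pre_unique_primes start n k) := by
  unfold Pre_unique_primes; infer_instance

def pvWitness_unique_primes : Int × Int × Int := (12, 5, 10)

def Spec_unique_primes (start : Int) (n : Int) (k : Int) (out : List Int) : Prop := out = unique_primes_alt start n k
instance (start : Int) (n : Int) (k : Int) (out : List Int) : Decidable (Spec_unique_primes start n k out) := by unfold Spec_unique_primes; infer_instance

-- ===== CLAIM (what is proved, stated in full; the proofs are below) =====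
def Claim_equal_unique_primes : Prop := ∀ (start : Int) (n : Int) (k : Int), Dom_unique_primes start n k → Pre_unique_primes start n k → Spec_unique_primes start n k (unique_primes start n k)

-- ===== LEMMAS AND PROOFS =====

/-- proof-side ideal: fully divide `p` out of `x` -/
def ocI (p x : Int) : Int :=
  if h : 2 ≤ p ∧ 1 ≤ x ∧ p ∣ x then ocI p (x / p) else x
termination_by x.toNat
decreasing_by
  rcases h with ⟨hp, hx, hd⟩
  have h1 : x / p < x := by
    have : x < p * x := by nlinarith
    exact Int.ediv_lt_of_lt_mul (by omega) (by nlinarith)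
  have h2 : 0 ≤ x / p := Int.ediv_nonneg (by omega) (by omega)
  omega

/-- proof-side primality on Int -/
def PrI (q : Int) : Prop := 2 ≤ q ∧ ∀ j : Int, 2 ≤ j → j < q → ¬ j ∣ q

theorem ocI_of_dvd (p x : Int) (hp : 2 ≤ p) (hx : 1 ≤ x) (hd : p ∣ x) :
    ocI p x = ocI p (x / p) := by
  rw [ocI]; simp [hp, hx, hd]

theorem ocI_of_not_dvd (p x : Int) (hd : ¬ p ∣ x) : ocI p x = x := by
  rw [ocI]; simp [hd]

theorem ocI_props (p : Int) (hp : 2 ≤ p) (x : Int) (hx : 1 ≤ x) :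
    1 ≤ ocI p x ∧ ocI p x ∣ x ∧ ¬ p ∣ ocI p x := by
  have H : ∀ n : ℕ, ∀ x : Int, x.toNat ≤ n → 1 ≤ x →
      1 ≤ ocI p x ∧ ocI p x ∣ x ∧ ¬ p ∣ ocI p x := by
    intro n
    induction n with
    | zero => intro x h hx; omega
    | succ n ih =>
      intro x h hx
      by_cases hd : p ∣ x
      · have hxp : x ≥ p := Int.le_of_dvd (by omega) hd
        have h1 : 1 ≤ x / p := (Int.le_ediv_iff_mul_le (by omega)).mpr (by omega)
        have hlt : x / p < x := by
          apply Int.ediv_lt_of_lt_mul (by omega); nlinarith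
        have hdv : x / p ∣ x := ⟨p, (Int.ediv_mul_cancel hd).symm⟩
        rw [ocI_of_dvd p x hp hx hd]
        obtain ⟨a, b, c⟩ := ih (x / p) (by omega) h1
        exact ⟨a, b.trans hdv, c⟩
      · rw [ocI_of_not_dvd p x hd]; exact ⟨hx, dvd_rfl, hd⟩
  exact H x.toNat x le_rfl hx

theorem PrI_iff_prime (q : Int) (h2 : 2 ≤ q) : PrI q ↔ Prime q := by
  rw [Int.prime_iff_natAbs_prime, Nat.prime_def_lt]
  constructor
  · rintro ⟨-, hP⟩
    refine ⟨by omega, fun m hm hmd => ?_⟩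
    by_contra hm1
    have hm0 : m ≠ 0 := by
      rintro rfl
      have := Nat.eq_zero_of_zero_dvd hmd
      omega
    have hmd' : (m : Int) ∣ q := by
      have : (m : Int) ∣ (q.natAbs : Int) := Int.natCast_dvd_natCast.mpr hmd
      rwa [Int.natAbs_of_nonneg (by omega)] at this
    exact hP m (by omega) (by omega) hmd'
  · rintro ⟨-, hP⟩
    refine ⟨h2, fun j hj hjq hjd => ?_⟩
    have : j.natAbs ∣ q.natAbs := Int.natAbs_dvd_natAbs.mpr hjd
    have := hP j.natAbs (by omega) this
    omega

theorem dvd_ocI_iff (p q x : Int) (hp : 2 ≤ p) (hpPr : Prime p) (hq : Prime q) (hq2 : 2 ≤ q)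
    (hne : q ≠ p) (hx : 1 ≤ x) : q ∣ ocI p x ↔ q ∣ x := by
  constructor
  · intro h; exact h.trans (ocI_props p hp x hx).2.1
  · intro h
    have H : ∀ n : ℕ, ∀ x : Int, x.toNat ≤ n → 1 ≤ x → q ∣ x → q ∣ ocI p x := by
      intro n
      induction n with
      | zero => intro x h hx; omega
      | succ n ih =>
        intro x hb hx hqx
        by_cases hd : p ∣ x
        · have hxp : x ≥ p := Int.le_of_dvd (by omega) hd
          have h1 : 1 ≤ x / p := (Int.le_ediv_iff_mul_le (by omega)).mpr (by omega)
          have hlt : x / p < x := by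
            apply Int.ediv_lt_of_lt_mul (by omega); nlinarith
          have hxe : x = p * (x / p) := by
            rw [mul_comm]; exact (Int.ediv_mul_cancel hd).symm
          have hq2 : q ∣ x / p := by
            rcases (hq.2.2 p (x / p) (hxe ▸ hqx)) with h' | h'
            · exfalso
              have h2q := (Nat.prime_dvd_prime_iff_eq
                (Int.prime_iff_natAbs_prime.mp hq)
                (Int.prime_iff_natAbs_prime.mp hpPr)).mp (Int.natAbs_dvd_natAbs.mpr h')
              omega
            · exact h'
          rw [ocI_of_dvd p x hp hx hd]
          exact ih (x / p) (by omega) h1 hq2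
        · rwa [ocI_of_not_dvd p x hd]
    exact H x.toNat x le_rfl hx h

theorem PrI_of_no_small (x : Int) (h1 : 2 ≤ x) (h : ∀ j : Int, 2 ≤ j → j*j ≤ x → ¬ j ∣ x) :
    PrI x := by
  refine ⟨h1, fun j hj hjx hjd => ?_⟩
  rcases hjd with ⟨c, hc⟩
  have hc2 : 2 ≤ c := by nlinarith
  by_cases hsq : j * j ≤ x
  · exact h j hj hsq ⟨c, hc⟩
  · have hcj : c < j := by nlinarith
    have hcc : c * c ≤ x := by nlinarith
    exact h c hc2 hcc ⟨j, by rw [hc]; ring⟩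

theorem exists_PrI_dvd (q : Int) (h : 1 < q) : ∃ d, PrI d ∧ d ∣ q := by
  obtain ⟨p, hp, hpd⟩ := Nat.exists_prime_and_dvd (n := q.toNat) (by omega)
  refine ⟨(p : Int), ?_, ?_⟩
  · exact (PrI_iff_prime _ (by exact_mod_cast hp.two_le)).mpr (Nat.prime_iff_prime_int.mp hp)
  · have : (p : Int) ∣ (q.toNat : Int) := Int.natCast_dvd_natCast.mpr hpd
    rwa [Int.toNat_of_nonneg (by omega)] at this

/-- the per-prime factor-set bookkeeping both programs perform -/
theorem PF_step (p x q : Int) (hp : PrI p) (hx : 1 ≤ x) :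
    (PrI q ∧ q ∣ x) ↔ ((q = p ∧ p ∣ x) ∨ (PrI q ∧ q ∣ ocI p x)) := by
  have hp2 : 2 ≤ p := hp.1
  by_cases hpd : p ∣ x
  · constructor
    · rintro ⟨hqP, hqx⟩
      by_cases hqp : q = p
      · exact Or.inl ⟨hqp, hpd⟩
      · exact Or.inr ⟨hqP, (dvd_ocI_iff p q x hp2 ((PrI_iff_prime p hp2).mp hp)
          ((PrI_iff_prime q hqP.1).mp hqP) hqP.1 hqp hx).mpr hqx⟩
    · rintro (⟨rfl, -⟩ | ⟨hqP, hqo⟩)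
      · exact ⟨hp, hpd⟩
      · exact ⟨hqP, hqo.trans (ocI_props p hp2 x hx).2.1⟩
  · rw [ocI_of_not_dvd p x hpd]
    constructor
    · rintro ⟨hqP, hqx⟩; exact Or.inr ⟨hqP, hqx⟩
    · rintro (⟨rfl, h⟩ | h)
      · exact absurd h hpd
      · exact h

theorem Set_add_idem (s : PySem.Set Int) (x : Int) :
    PySem.Set.add (PySem.Set.add s x) x = PySem.Set.add s x := by
  have hx : x ∈ PySem.Set.add s x := (PySem.Set.mem_add s x x).mpr (Or.inr rfl)
  rw [PySem.Set.add, if_pos ((PySem.Set.contains_iff _ _).mpr hx)]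

theorem pvAdivOut_eq (p : Int) (hp : 2 ≤ p) :
    ∀ (fuel : Nat) (x : Int) (f : PySem.Set Int), 1 ≤ x → x.toNat < fuel →
      pvAdivOut fuel x p f = (ocI p x, if p ∣ x then PySem.Set.add f p else f) := by
  intro fuel
  induction fuel with
  | zero => intro x f hx hf; omega
  | succ fuel ih =>
    intro x f hx hf
    simp only [pvAdivOut]
    by_cases hd : p ∣ x
    · rw [if_pos ((PySem.Int.mod_eq_zero_iff_dvd x p).mpr hd)]
      have hxp : x ≥ p := Int.le_of_dvd (by omega) hd
      have h1 : 1 ≤ x / p := (Int.le_ediv_iff_mul_le (by omega)).mpr (by omega)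
      have hlt : x / p < x := by
        apply Int.ediv_lt_of_lt_mul (by omega); nlinarith
      rw [PySem.Int.floordiv_eq_ediv_of_pos (by omega)]
      rw [ih (x / p) (PySem.Set.add f p) h1 (by omega)]
      rw [← ocI_of_dvd p x hp hx hd, if_pos hd]
      by_cases hd2 : p ∣ x / p
      · rw [if_pos hd2, Set_add_idem]
      · rw [if_neg hd2]
    · rw [if_neg (fun h => hd ((PySem.Int.mod_eq_zero_iff_dvd x p).mp h))]
      rw [ocI_of_not_dvd p x hd, if_neg hd]

theorem pvBdiv_eq (p : Int) (hp : 2 ≤ p) :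
    ∀ (fuel : Nat) (x : Int), 1 ≤ x → x.toNat < fuel → pvBdiv fuel x p = ocI p x := by
  intro fuel
  induction fuel with
  | zero => intro x hx hf; omega
  | succ fuel ih =>
    intro x hx hf
    simp only [pvBdiv]
    by_cases hd : p ∣ x
    · by_cases hx1 : 1 < x
      · rw [if_pos ⟨hx1, (PySem.Int.mod_eq_zero_iff_dvd x p).mpr hd⟩]
        have hxp : x ≥ p := Int.le_of_dvd (by omega) hd
        have h1 : 1 ≤ x / p := (Int.le_ediv_iff_mul_le (by omega)).mpr (by omega)
        have hlt : x / p < x := by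
          apply Int.ediv_lt_of_lt_mul (by omega); nlinarith
        rw [PySem.Int.floordiv_eq_ediv_of_pos (by omega)]
        rw [ih (x / p) h1 (by omega), ← ocI_of_dvd p x hp hx hd]
      · have hx1' : x = 1 := by omega
        subst hx1'
        have : p ≤ 1 := Int.le_of_dvd (by omega) hd
        omega
    · rw [if_neg (fun h => hd ((PySem.Int.mod_eq_zero_iff_dvd x p).mp h.2))]
      rw [ocI_of_not_dvd p x hd]

theorem terminal_mem (x : Int) (i : Int) (f : PySem.Set Int) (hx : 1 ≤ x)
    (hinv : ∀ j : Int, 2 ≤ j → j < i → ¬ j ∣ x)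
    (hterm : ∀ j : Int, 2 ≤ j → j*j ≤ x → j < i) (q : Int) :
    (q ∈ (if 1 < x then PySem.Set.add f x else f) ↔ q ∈ f ∨ (PrI q ∧ q ∣ x)) := by
  by_cases hx1 : 1 < x
  · rw [if_pos hx1, PySem.Set.mem_add]
    have hPx : PrI x := PrI_of_no_small x (by omega) (fun j h2 hsq => hinv j h2 (hterm j h2 hsq))
    constructor
    · rintro (h | rfl)
      · exact Or.inl h
      · exact Or.inr ⟨hPx, dvd_rfl⟩
    · rintro (h | ⟨hq, hqd⟩)
      · exact Or.inl h
      · right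
        have hqx : q ≤ x := Int.le_of_dvd (by omega) hqd
        rcases eq_or_lt_of_le hqx with rfl | hlt
        · rfl
        · exact absurd hqd (hPx.2 q hq.1 hlt)
  · have hx1' : x = 1 := by omega
    subst hx1'
    rw [if_neg hx1]
    constructor
    · exact Or.inl
    · rintro (h | ⟨hq, hqd⟩)
      · exact h
      · have := Int.le_of_dvd one_pos hqd
        exact absurd this (by have := hq.1; omega)

theorem pvAouter_main :
    ∀ (fuel : Nat) (x i : Int) (f : PySem.Set Int), 1 ≤ x → 3 ≤ i → i % 2 = 1 →
      (∀ j : Int, 2 ≤ j → j < i → ¬ j ∣ x) → x.toNat + 2 ≤ fuel + i.toNat →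
      ∀ q, (q ∈ (if 1 < (pvAouter fuel x i f).1
                 then PySem.Set.add (pvAouter fuel x i f).2 (pvAouter fuel x i f).1
                 else (pvAouter fuel x i f).2)
            ↔ q ∈ f ∨ (PrI q ∧ q ∣ x)) := by
  intro fuel
  induction fuel with
  | zero =>
    intro x i f hx hi hodd hinv hfuel q
    simp only [pvAouter]
    refine terminal_mem x i f hx hinv (fun j h2 hsq => ?_) q
    have : j ≤ j * j := by nlinarith
    omega
  | succ fuel ih =>
    intro x i f hx hi hodd hinv hfuel q
    simp only [pvAouter]
    by_cases hii : i * i ≤ x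
    · rw [if_pos hii]
      have hi2 : 2 ≤ i := by omega
      rw [pvAdivOut_eq i hi2 (x.toNat + 1) x f hx (by omega)]
      dsimp only
      have hops := ocI_props i hi2 x hx
      set x' := ocI i x with hx'def
      have hx' : 1 ≤ x' := hops.1
      have hx'le : x' ≤ x := Int.le_of_dvd (by omega) hops.2.1
      have h2x : ¬ (2:Int) ∣ x := hinv 2 le_rfl (by omega)
      have hinv' : ∀ j : Int, 2 ≤ j → j < i + 2 → ¬ j ∣ x' := by
        intro j h2 hlt hdvd
        rcases lt_trichotomy j i with hj | rfl | hj
        · exact hinv j h2 hj (hdvd.trans hops.2.1)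
        · exact hops.2.2 hdvd
        · have hji : j = i + 1 := by omega
          subst hji
          have h2i : (2:Int) ∣ (i + 1) := by omega
          exact h2x ((h2i.trans hdvd).trans hops.2.1)
      have hmem := ih x' (i + 2) (if i ∣ x then PySem.Set.add f i else f) hx' (by omega) (by omega) hinv' (by omega) q
      rw [hmem]
      by_cases hd : i ∣ x
      · rw [if_pos hd]
        have hPi : PrI i := ⟨hi2, fun j h2 hlt hdvd => hinv j h2 hlt (hdvd.trans hd)⟩
        have hPF := PF_step i x q hPi hx
        rw [PySem.Set.mem_add]
        constructor
        · rintro ((h | rfl) | h)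
          · exact Or.inl h
          · exact Or.inr (hPF.mpr (Or.inl ⟨rfl, hd⟩))
          · exact Or.inr (hPF.mpr (Or.inr h))
        · rintro (h | h)
          · exact Or.inl (Or.inl h)
          · rcases hPF.mp h with ⟨rfl, -⟩ | h'
            · exact Or.inl (Or.inr rfl)
            · exact Or.inr h'
      · rw [if_neg hd]
        rw [hx'def, ocI_of_not_dvd i x hd]
    · rw [if_neg hii]
      refine terminal_mem x i f hx hinv (fun j h2 hsq => ?_) q
      nlinarith

theorem pvApf_mem (k x : Int) (hx : 1 ≤ x) (q : Int) :
    q ∈ pvApf k x ↔ (k - 3 ≤ q ∧ PrI q ∧ q ∣ x) := by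
  have h22 : (2:Int) ≤ 2 := le_rfl
  have hP2 : PrI (2:Int) := ⟨le_rfl, fun j h2 hlt => by omega⟩
  simp only [pvApf]
  rw [pvAdivOut_eq 2 h22 (x.toNat + 1) x PySem.Set.empty hx (by omega)]
  dsimp only
  have hops := ocI_props 2 h22 x hx
  set x1 := ocI 2 x with hx1def
  have hx1 : 1 ≤ x1 := hops.1
  have hinv : ∀ j : Int, 2 ≤ j → j < 3 → ¬ j ∣ x1 := by
    intro j h2 hlt
    have : j = 2 := by omega
    subst this
    exact hops.2.2
  have houter := pvAouter_main (x1.toNat + 1) x1 3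
    (if (2:Int) ∣ x then PySem.Set.add PySem.Set.empty 2 else PySem.Set.empty)
    hx1 le_rfl (by norm_num) hinv (by omega) q
  rw [List.mem_filter, houter]
  have hPF := PF_step 2 x q hP2 hx
  have hmem1 : q ∈ (if (2:Int) ∣ x then PySem.Set.add PySem.Set.empty 2 else PySem.Set.empty)
      ↔ (q = 2 ∧ (2:Int) ∣ x) := by
    by_cases hd : (2:Int) ∣ x
    · rw [if_pos hd, PySem.Set.mem_add]
      simp [PySem.Set.empty, hd]
    · rw [if_neg hd]
      simp [PySem.Set.empty, hd]
  rw [hmem1]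
  constructor
  · rintro ⟨h1, h2⟩
    have : PrI q ∧ q ∣ x := hPF.mpr (by tauto)
    exact ⟨by simpa using h2, this⟩
  · rintro ⟨h1, h2⟩
    refine ⟨?_, by simpa using h1⟩
    rcases hPF.mp h2 with h | h
    · exact Or.inl h
    · exact Or.inr h

theorem mem_foldl_union (k : Int) :
    ∀ (l : List Int) (acc : PySem.Set Int) (q : Int),
      q ∈ l.foldl (fun s x => PySem.Set.union s (pvApf k x)) acc ↔
        q ∈ acc ∨ ∃ x ∈ l, q ∈ pvApf k x := by
  intro l
  induction l with
  | nil => intro acc q; simp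
  | cons x l ih =>
    intro acc q
    rw [List.foldl_cons, ih]
    rw [PySem.Set.mem_union]
    simp only [List.mem_cons]
    constructor
    · rintro ((h | h) | ⟨y, hy, hq⟩)
      · exact Or.inl h
      · exact Or.inr ⟨x, Or.inl rfl, h⟩
      · exact Or.inr ⟨y, Or.inr hy, hq⟩
    · rintro (h | ⟨y, (rfl | hy), hq⟩)
      · exact Or.inl (Or.inl h)
      · exact Or.inl (Or.inr hq)
      · exact Or.inr ⟨y, hy, hq⟩

theorem nodup_foldl_union (k : Int) :
    ∀ (l : List Int) (acc : PySem.Set Int), acc.Nodup →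
      (l.foldl (fun s x => PySem.Set.union s (pvApf k x)) acc).Nodup := by
  intro l
  induction l with
  | nil => intro acc h; exact h
  | cons x l ih =>
    intro acc h
    exact ih _ (PySem.Set.nodup_union _ _ h)

theorem pvBsqrtLoop_spec (m : Int) :
    ∀ (fuel : Nat) (s : Int), 1 ≤ s → s*s ≤ m → m.toNat + 1 ≤ fuel + s.toNat →
      1 ≤ pvBsqrtLoop fuel s m ∧ (pvBsqrtLoop fuel s m) * (pvBsqrtLoop fuel s m) ≤ m ∧
        m < (pvBsqrtLoop fuel s m + 1) * (pvBsqrtLoop fuel s m + 1) := by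
  intro fuel
  induction fuel with
  | zero =>
    intro s hs hsm hb
    exfalso
    have : s ≤ s * s := by nlinarith
    omega
  | succ fuel ih =>
    intro s hs hsm hb
    simp only [pvBsqrtLoop]
    by_cases hc : (s+1)*(s+1) ≤ m
    · rw [if_pos hc]
      exact ih (s+1) (by omega) hc (by omega)
    · rw [if_neg hc]
      exact ⟨hs, hsm, by omega⟩

theorem pvBisP_iff (d : Int) :
    ∀ (fuel : Nat) (e : Int), 2 ≤ e → d.toNat + 1 ≤ fuel + e.toNat →
      (pvBisP fuel d e = true ↔ ∀ j : Int, e ≤ j → j*j ≤ d → ¬ j ∣ d) := by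
  intro fuel
  induction fuel with
  | zero =>
    intro e he hb
    simp only [pvBisP, true_iff]
    intro j hj hjj hjd
    have hde : d < e := by omega
    have hjle : j ≤ j * j := by nlinarith
    linarith
  | succ fuel ih =>
    intro e he hb
    simp only [pvBisP]
    by_cases hsq : e*e ≤ d
    · rw [if_pos hsq]
      by_cases hd : e ∣ d
      · rw [if_pos ((PySem.Int.mod_eq_zero_iff_dvd d e).mpr hd)]
        simp only [Bool.false_eq_true, false_iff, not_forall]
        exact ⟨e, le_rfl, by simpa using ⟨hsq, hd⟩⟩
      · rw [if_neg (fun h => hd ((PySem.Int.mod_eq_zero_iff_dvd d e).mp h))]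
        rw [ih (e+1) (by omega) (by omega)]
        constructor
        · intro h j hj hjj hjd
          rcases eq_or_lt_of_le hj with rfl | hlt
          · exact hd hjd
          · exact h j (by omega) hjj hjd
        · intro h j hj hjj
          exact h j (by omega) hjj
    · rw [if_neg hsq]
      simp only [true_iff]
      intro j hj hjj hjd
      nlinarith

theorem pvBisP_iff_PrI (d : Int) (hd : 2 ≤ d) :
    (pvBisP (d.toNat + 1) d 2 = true) ↔ PrI d := by
  rw [pvBisP_iff d (d.toNat + 1) 2 le_rfl (by omega)]
  constructor
  · intro h
    exact PrI_of_no_small d hd (fun j h2 => h j h2)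
  · rintro ⟨-, hP⟩ j hj hjj hjd
    have hjd' : j ≤ d := Int.le_of_dvd (by omega) hjd
    rcases eq_or_lt_of_le hjd' with rfl | hlt
    · nlinarith
    · exact hP j hj hlt hjd

/-- `redL P x`: `x` with every prime of `P` fully divided out -/
def redL (P : List Int) (x : Int) : Int := P.foldl (fun x p => ocI p x) x

theorem redL_props : ∀ (P : List Int), (∀ p ∈ P, PrI p) → ∀ x : Int, 1 ≤ x →
    1 ≤ redL P x ∧ redL P x ∣ x ∧ (∀ q, PrI q → (q ∣ redL P x ↔ q ∣ x ∧ q ∉ P)) := by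
  intro P
  induction P with
  | nil =>
    intro _ x hx
    refine ⟨hx, dvd_rfl, fun q _ => by simp [redL]⟩
  | cons p P' ih =>
    intro hP x hx
    have hpP : PrI p := hP p List.mem_cons_self
    have hops := ocI_props p hpP.1 x hx
    have hred : redL (p :: P') x = redL P' (ocI p x) := by simp [redL]
    obtain ⟨ih1, ih2, ih3⟩ := ih (fun r hr => hP r (List.mem_cons_of_mem p hr)) (ocI p x) hops.1
    rw [hred]
    refine ⟨ih1, ih2.trans hops.2.1, fun q hq => ?_⟩
    rw [ih3 q hq]
    by_cases hqp : q = p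
    · subst hqp
      constructor
      · rintro ⟨h, -⟩; exact absurd h hops.2.2
      · rintro ⟨-, h⟩; exact absurd List.mem_cons_self h
    · have hiff : q ∣ ocI p x ↔ q ∣ x :=
        dvd_ocI_iff p q x hpP.1 ((PrI_iff_prime p hpP.1).mp hpP)
          ((PrI_iff_prime q hq.1).mp hq) hq.1 hqp hx
      rw [hiff]
      simp [List.mem_cons, hqp]

-- the ceiling `first = ((lo + p - 1) // p) * p`
theorem first_dvd (lo p : Int) : p ∣ PySem.Int.floordiv (lo + p - 1) p * p :=
  ⟨PySem.Int.floordiv (lo + p - 1) p, mul_comm _ _⟩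

theorem first_ge (lo p : Int) (hp : 0 < p) : lo ≤ PySem.Int.floordiv (lo + p - 1) p * p := by
  have h := (PySem.Int.floordiv_eq_iff_of_pos (a := lo + p - 1) hp
    (q := PySem.Int.floordiv (lo + p - 1) p)).mp rfl
  nlinarith [h.1, h.2]

theorem first_min (lo p y : Int) (hp : 0 < p) (hd : p ∣ y) (hy : lo ≤ y) :
    PySem.Int.floordiv (lo + p - 1) p * p ≤ y := by
  obtain ⟨c, hc⟩ := hd
  have h := (PySem.Int.floordiv_eq_iff_of_pos (a := lo + p - 1) hp
    (q := PySem.Int.floordiv (lo + p - 1) p)).mp rfl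
  set q := PySem.Int.floordiv (lo + p - 1) p with hq
  by_contra hnot
  push_neg at hnot
  have hcq : c < q := by nlinarith [h.1, h.2]
  have : q * p ≤ lo + p - 1 := h.1
  nlinarith

theorem mem_mults (lo hi p y : Int) (hp : 0 < p) :
    y ∈ PySem.List.pyRange (PySem.Int.floordiv (lo + p - 1) p * p) (hi + 1) p ↔
      p ∣ y ∧ lo ≤ y ∧ y ≤ hi := by
  rw [PySem.List.mem_pyRange_iff_of_pos hp y]
  constructor
  · rintro ⟨h1, h2, h3⟩
    have hpy : p ∣ y := by
      have := dvd_add h3 (first_dvd lo p)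
      rwa [sub_add_cancel] at this
    exact ⟨hpy, le_trans (first_ge lo p hp) h1, by omega⟩
  · rintro ⟨h1, h2, h3⟩
    exact ⟨first_min lo p y hp h1 h2, by omega, dvd_sub h1 (first_dvd lo p)⟩

theorem nodup_mults (a b p : Int) (hp : 0 < p) : (PySem.List.pyRange a b p).Nodup := by
  rw [PySem.List.pyRange_of_pos a b hp]
  apply List.Nodup.map _ List.nodup_range
  intro k1 k2 h
  have h2 : p * (k1 : Int) = p * (k2 : Int) := by
    have := h
    simp only at this
    linarith
  have := mul_left_cancel₀ (by omega : (p:Int) ≠ 0) h2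
  exact_mod_cast this

theorem fold_set_pointwise (lo p : Int) :
    ∀ (mults : List Int) (rem : List Int), mults.Nodup →
      (∀ mu ∈ mults, lo ≤ mu ∧ mu < lo + (rem.length : Int)) →
      (mults.foldl (fun rem mult =>
          rem.set (mult - lo).toNat
            (pvBdiv ((rem.getD (mult - lo).toNat 0).toNat + 1) (rem.getD (mult - lo).toNat 0) p))
        rem).length = rem.length ∧
      ∀ j : Nat, j < rem.length →
        (mults.foldl (fun rem mult =>
            rem.set (mult - lo).toNat
              (pvBdiv ((rem.getD (mult - lo).toNat 0).toNat + 1) (rem.getD (mult - lo).toNat 0) p))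
          rem).getD j 0 =
          if ((lo + (j : Int)) ∈ mults)
          then pvBdiv ((rem.getD j 0).toNat + 1) (rem.getD j 0) p
          else rem.getD j 0 := by
  intro mults
  induction mults with
  | nil => intro rem _ _; exact ⟨rfl, fun j _ => by simp⟩
  | cons mu rest ih =>
    intro rem hnd hbd
    have hnd' := List.nodup_cons.mp hnd
    have hmu := hbd mu List.mem_cons_self
    set j0 := (mu - lo).toNat with hj0def
    have hj0 : j0 < rem.length := by omega
    have hj0mu : lo + (j0 : Int) = mu := by omega
    set v := pvBdiv ((rem.getD j0 0).toNat + 1) (rem.getD j0 0) p with hvdef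
    set rem1 := rem.set j0 v with hrem1
    have hlen1 : rem1.length = rem.length := List.length_set
    have hbd' : ∀ mu' ∈ rest, lo ≤ mu' ∧ mu' < lo + (rem1.length : Int) := by
      intro mu' hmu'
      rw [hlen1]
      exact hbd mu' (List.mem_cons_of_mem mu hmu')
    obtain ⟨ihlen, ihget⟩ := ih rem1 hnd'.2 hbd'
    rw [List.foldl_cons]
    constructor
    · dsimp only
      rw [← hrem1, ihlen, hlen1]
    · intro j hj
      rw [← hrem1, ihget j (by omega)]
      by_cases hjj : (lo + (j : Int)) = mu
      · have hj0j : j = j0 := by omega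
        have hnotin : (lo + (j : Int)) ∉ rest := by rw [hjj]; exact hnd'.1
        rw [if_neg hnotin, if_pos (by rw [hjj]; exact List.mem_cons_self)]
        rw [hj0j, hrem1, List.getD_eq_getElem _ _ (by rw [List.length_set]; exact hj0),
          List.getElem_set_self (by rwa [List.length_set])]
      · have hjne : j ≠ j0 := by omega
        have hget1 : rem1.getD j 0 = rem.getD j 0 := by
          rw [hrem1]
          simp only [List.getD_eq_getElem?_getD]
          rw [List.getElem?_set_ne (Ne.symm hjne)]
        rw [hget1]
        by_cases hmem2 : (lo + (j : Int)) ∈ rest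
        · rw [if_pos hmem2, if_pos (List.mem_cons_of_mem mu hmem2)]
        · rw [if_neg hmem2, if_neg (by simp [List.mem_cons, hjj, hmem2])]

theorem primes_fold (lo hi T : Int) (hlo : 1 ≤ lo) (hle : lo ≤ hi) :
    ∀ (P : List Int), (∀ p ∈ P, PrI p) →
    ∀ (rem : List Int) (fnd : PySem.Set Int),
      (rem.length : Int) = hi + 1 - lo →
      (∀ j : Nat, (j : Int) < hi + 1 - lo → 1 ≤ rem.getD j 0 ∧ rem.getD j 0 ∣ (lo + j)) →
      fnd.Nodup →
      ((P.foldl (fun st p => pvBpass lo hi T p st) (rem, fnd)).1.length : Int) = hi + 1 - lo ∧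
      (∀ j : Nat, (j : Int) < hi + 1 - lo →
        (P.foldl (fun st p => pvBpass lo hi T p st) (rem, fnd)).1.getD j 0 = redL P (rem.getD j 0)) ∧
      (∀ q, q ∈ (P.foldl (fun st p => pvBpass lo hi T p st) (rem, fnd)).2 ↔
        q ∈ fnd ∨ (q ∈ P ∧ T ≤ q ∧ ∃ y, lo ≤ y ∧ y ≤ hi ∧ q ∣ y)) ∧
      (P.foldl (fun st p => pvBpass lo hi T p st) (rem, fnd)).2.Nodup := by
  intro P
  induction P with
  | nil =>
    intro _ rem fnd hlen hinv hnd
    exact ⟨hlen, fun j _ => by simp [redL], fun q => by simp, hnd⟩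
  | cons p P' ih =>
    intro hP rem fnd hlen hinv hnd
    have hpP : PrI p := hP p List.mem_cons_self
    have hp2 : 2 ≤ p := hpP.1
    set F := PySem.Int.floordiv (lo + p - 1) p * p with hF
    set mults := PySem.List.pyRange F (hi + 1) p with hmults
    have hbd : ∀ mu ∈ mults, lo ≤ mu ∧ mu < lo + (rem.length : Int) := by
      intro mu hmu
      have h := (mem_mults lo hi p mu (by omega)).mp hmu
      exact ⟨h.2.1, by omega⟩
    obtain ⟨hlen', hget'⟩ := fold_set_pointwise lo p mults rem (nodup_mults F (hi+1) p (by omega)) hbd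
    set rem' := mults.foldl (fun rem mult =>
        rem.set (mult - lo).toNat
          (pvBdiv ((rem.getD (mult - lo).toNat 0).toNat + 1) (rem.getD (mult - lo).toNat 0) p))
      rem with hrem'
    set fnd' := (if F ≤ hi ∧ T ≤ p then PySem.Set.add fnd p else fnd) with hfnd'
    have hpassEq : pvBpass lo hi T p (rem, fnd) = (rem', fnd') := rfl
    rw [List.foldl_cons, hpassEq]
    have hget'' : ∀ j : Nat, (j : Int) < hi + 1 - lo → rem'.getD j 0 = ocI p (rem.getD j 0) := by
      intro j hj
      rw [hrem', hget' j (by omega)]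
      have hinvj := hinv j hj
      by_cases hdv : p ∣ (lo + (j : Int))
      · rw [if_pos ((mem_mults lo hi p _ (by omega)).mpr ⟨hdv, by omega, by omega⟩)]
        exact pvBdiv_eq p hp2 _ _ hinvj.1 (by omega)
      · rw [if_neg (fun hmem => hdv ((mem_mults lo hi p _ (by omega)).mp hmem).1)]
        rw [ocI_of_not_dvd p _ (fun hpd => hdv (hpd.trans hinvj.2))]
    have hlen'' : ((rem'.length : Int)) = hi + 1 - lo := by rw [hrem', hlen', hlen]
    have hinv' : ∀ j : Nat, (j : Int) < hi + 1 - lo →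
        1 ≤ rem'.getD j 0 ∧ rem'.getD j 0 ∣ (lo + j) := by
      intro j hj
      rw [hget'' j hj]
      have hinvj := hinv j hj
      have hops := ocI_props p hp2 _ hinvj.1
      exact ⟨hops.1, hops.2.1.trans hinvj.2⟩
    have hfnd'mem : ∀ q, q ∈ fnd' ↔
        q ∈ fnd ∨ (q = p ∧ T ≤ q ∧ ∃ y, lo ≤ y ∧ y ≤ hi ∧ q ∣ y) := by
      intro q
      rw [hfnd']
      by_cases hc : F ≤ hi ∧ T ≤ p
      · rw [if_pos hc, PySem.Set.mem_add]
        constructor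
        · rintro (h | hqp)
          · exact Or.inl h
          · refine Or.inr ⟨hqp, by rw [hqp]; exact hc.2, F, first_ge lo p (by omega), hc.1, ?_⟩
            rw [hqp]; exact first_dvd lo p
        · rintro (h | ⟨hqp, -⟩)
          · exact Or.inl h
          · exact Or.inr hqp
      · rw [if_neg hc]
        constructor
        · exact Or.inl
        · rintro (h | ⟨hqp, hT, y, hy1, hy2, hyd⟩)
          · exact h
          · rw [hqp] at hT hyd
            exact absurd ⟨le_trans (first_min lo p y (by omega) hyd hy1) hy2, hT⟩ hc
    have hfnd'nd : fnd'.Nodup := by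
      rw [hfnd']
      by_cases hc : F ≤ hi ∧ T ≤ p
      · rw [if_pos hc]; exact PySem.Set.nodup_add _ _ hnd
      · rw [if_neg hc]; exact hnd
    obtain ⟨L1, L2, L3, L4⟩ := ih (fun r hr => hP r (List.mem_cons_of_mem p hr))
      rem' fnd' hlen'' hinv' hfnd'nd
    refine ⟨L1, ?_, ?_, L4⟩
    · intro j hj
      rw [L2 j hj, hget'' j hj]
      simp [redL]
    · intro q
      rw [L3 q, hfnd'mem q]
      simp only [List.mem_cons]
      constructor
      · rintro ((h | ⟨rfl, h2, h3⟩) | ⟨h1, h2, h3⟩)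
        · exact Or.inl h
        · exact Or.inr ⟨Or.inl rfl, h2, h3⟩
        · exact Or.inr ⟨Or.inr h1, h2, h3⟩
      · rintro (h | ⟨(rfl | h1), h2, h3⟩)
        · exact Or.inl (Or.inl h)
        · exact Or.inl (Or.inr ⟨rfl, h2, h3⟩)
        · exact Or.inr ⟨h1, h2, h3⟩

theorem mem_leftover_fold (T : Int) :
    ∀ (l : List Int) (f : PySem.Set Int) (q : Int),
      q ∈ l.foldl (fun f r => if 1 < r ∧ T ≤ r then PySem.Set.add f r else f) f ↔
        q ∈ f ∨ (q ∈ l ∧ 1 < q ∧ T ≤ q) := by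
  intro l
  induction l with
  | nil => intro f q; simp
  | cons r l ih =>
    intro f q
    rw [List.foldl_cons, ih]
    simp only [List.mem_cons]
    by_cases hc : 1 < r ∧ T ≤ r
    · rw [if_pos hc]
      rw [PySem.Set.mem_add]
      constructor
      · rintro ((h | rfl) | h)
        · exact Or.inl h
        · exact Or.inr ⟨Or.inl rfl, hc⟩
        · exact Or.inr ⟨Or.inr h.1, h.2⟩
      · rintro (h | ⟨(rfl | hq), h2⟩)
        · exact Or.inl (Or.inl h)
        · exact Or.inl (Or.inr rfl)
        · exact Or.inr ⟨hq, h2⟩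
    · rw [if_neg hc]
      constructor
      · rintro (h | h)
        · exact Or.inl h
        · exact Or.inr ⟨Or.inr h.1, h.2⟩
      · rintro (h | ⟨(rfl | hq), h2⟩)
        · exact Or.inl h
        · exact absurd h2 hc
        · exact Or.inr ⟨hq, h2⟩

theorem nodup_leftover_fold (T : Int) :
    ∀ (l : List Int) (f : PySem.Set Int), f.Nodup →
      (l.foldl (fun f r => if 1 < r ∧ T ≤ r then PySem.Set.add f r else f) f).Nodup := by
  intro l
  induction l with
  | nil => intro f h; exact h
  | cons r l ih =>
    intro f h
    rw [List.foldl_cons]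
    apply ih
    dsimp only
    by_cases hc : 1 < r ∧ T ≤ r
    · rw [if_pos hc]; exact PySem.Set.nodup_add _ _ h
    · rw [if_neg hc]; exact h

theorem leftover_char (s hi : Int) (primes : List Int) (hs1 : 1 ≤ s)
    (hpr : ∀ p, p ∈ primes ↔ (2 ≤ p ∧ p ≤ s ∧ PrI p))
    (hhi : hi < (s+1)*(s+1)) (x : Int) (hx : 1 ≤ x) (hxhi : x ≤ hi) (q : Int) (h1 : 1 < q) :
    (redL primes x = q ↔ (PrI q ∧ s < q ∧ q ∣ x)) := by
  have hPall : ∀ p ∈ primes, PrI p := fun p hp => ((hpr p).mp hp).2.2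
  have hR := redL_props primes hPall x hx
  constructor
  · intro hRq
    obtain ⟨d, hdP, hdq⟩ := exists_PrI_dvd q h1
    have hdR : d ∣ redL primes x := hRq ▸ hdq
    have hdx := (hR.2.2 d hdP).mp hdR
    have hds : s < d := by
      by_contra hle
      push_neg at hle
      exact hdx.2 ((hpr d).mpr ⟨hdP.1, hle, hdP⟩)
    obtain ⟨c, hcq⟩ := hdq
    have hc1 : 1 ≤ c := by
      by_contra hcn
      push_neg at hcn
      have hnp : d * c ≤ 0 := mul_nonpos_iff.mpr (Or.inl ⟨by omega, by have := hdP.1; omega⟩)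
      rw [hcq] at h1
      linarith
    have hqx : q ∣ x := hRq ▸ hR.2.1
    have hqlex : q ≤ x := Int.le_of_dvd (by omega) hqx
    rcases eq_or_lt_of_le hc1 with hc | hc
    · have hqd : q = d := by rw [hcq, ← hc, mul_one]
      exact ⟨hqd ▸ hdP, hqd ▸ hds, hqx⟩
    · exfalso
      obtain ⟨d2, hd2P, hd2c⟩ := exists_PrI_dvd c hc
      have hd2q : d2 ∣ q := hd2c.trans ⟨d, by rw [hcq]; ring⟩
      have hd2R : d2 ∣ redL primes x := hRq ▸ hd2q
      have hd2x := (hR.2.2 d2 hd2P).mp hd2R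
      have hd2s : s < d2 := by
        by_contra hle
        push_neg at hle
        exact hd2x.2 ((hpr d2).mpr ⟨hd2P.1, hle, hd2P⟩)
      have hcd2 : d2 ≤ c := Int.le_of_dvd (by omega) hd2c
      have hbig : (s+1)*(s+1) ≤ d * c :=
        mul_le_mul (by omega) (by omega) (by omega) (by have := hdP.1; omega)
      rw [hcq] at hqlex
      linarith
  · rintro ⟨hqP, hqs, hqx⟩
    have hqnotin : q ∉ primes := fun hin => by have := ((hpr q).mp hin).2.1; omega
    have hqR : q ∣ redL primes x := (hR.2.2 q hqP).mpr ⟨hqx, hqnotin⟩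
    obtain ⟨c, hcR⟩ := hqR
    have hRlex : redL primes x ≤ x := Int.le_of_dvd (by omega) hR.2.1
    have hc1 : 1 ≤ c := by
      by_contra hcn
      push_neg at hcn
      have hnp : q * c ≤ 0 := mul_nonpos_iff.mpr (Or.inl ⟨by have := hqP.1; omega, by omega⟩)
      have := hR.1
      rw [hcR] at this
      linarith
    rcases eq_or_lt_of_le hc1 with hc | hc
    · rw [hcR, ← hc, mul_one]
    · exfalso
      obtain ⟨d2, hd2P, hd2c⟩ := exists_PrI_dvd c hc
      have hd2R : d2 ∣ redL primes x := hd2c.trans ⟨q, by rw [hcR]; ring⟩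
      have hd2x := (hR.2.2 d2 hd2P).mp hd2R
      have hd2s : s < d2 := by
        by_contra hle
        push_neg at hle
        exact hd2x.2 ((hpr d2).mpr ⟨hd2P.1, hle, hd2P⟩)
      have hcd2 : d2 ≤ c := Int.le_of_dvd (by omega) hd2c
      have hbig : (s+1)*(s+1) ≤ q * c :=
        mul_le_mul (by omega) (by omega) (by omega) (by have := hqP.1; omega)
      rw [hcR] at hRlex
      linarith

theorem main_eq (start n k : Int) (hPre : Pre_unique_primes start n k) :
    unique_primes start n k = unique_primes_alt start n k := by
  by_cases hc : start < start - n
  · have hrange : PySem.List.pyRange (start - n) (start + 1) 1 = [] := by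
      apply List.eq_nil_iff_length_eq_zero.mpr
      rw [PySem.List.length_pyRange_one]
      omega
    simp only [unique_primes, unique_primes_alt]
    rw [if_pos hc, hrange]
    rfl
  · have hlo : 1 ≤ start - n := by
      rcases hPre with h | h
      · omega
      · exact h
    have hle : start - n ≤ start := by omega
    simp only [unique_primes, unique_primes_alt]
    rw [if_neg hc]
    have hm : max |start - n| |start| = start := by
      rw [abs_of_pos (by omega : (0:Int) < start - n), abs_of_pos (by omega : (0:Int) < start)]
      exact max_eq_right (by omega)
    rw [hm]
    rw [PySem.List.foldl_append_if_eq_filter (fun d => pvBisP (d.toNat + 1) d 2), List.nil_append]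
    -- names
    set T := k - 3 with hT
    set lo := start - n with hlodef
    set hi := start with hhidef
    set s := pvBsqrtLoop (hi.toNat + 1) 1 hi with hsdef
    set primes := (PySem.List.pyRange 2 (s + 1) 1).filter (fun d => pvBisP (d.toNat + 1) d 2)
      with hprdef
    set rem0 := (PySem.List.pyRange lo (hi + 1) 1).map (fun x => |x|) with hrem0
    set u := (PySem.List.pyRange lo (hi + 1) 1).foldl
      (fun s x => PySem.Set.union s (pvApf k x)) PySem.Set.empty with hu
    set st := primes.foldl (fun st p => pvBpass lo hi T p st) (rem0, PySem.Set.empty) with hst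
    set fnd := st.1.foldl (fun f r => if 1 < r ∧ T ≤ r then PySem.Set.add f r else f) st.2
      with hfnd
    -- sqrt facts
    have hs := pvBsqrtLoop_spec hi (hi.toNat + 1) 1 le_rfl (by nlinarith) (by omega)
    rw [← hsdef] at hs
    -- primes membership
    have hprmem : ∀ p : Int, p ∈ primes ↔ (2 ≤ p ∧ p ≤ s ∧ PrI p) := by
      intro p
      rw [hprdef, List.mem_filter, PySem.List.mem_pyRange_one]
      constructor
      · rintro ⟨⟨h2, hlt⟩, hb⟩
        exact ⟨h2, by omega, (pvBisP_iff_PrI p h2).mp hb⟩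
      · rintro ⟨h2, hlt, hP⟩
        exact ⟨⟨h2, by omega⟩, (pvBisP_iff_PrI p h2).mpr hP⟩
    -- rem0 facts
    have hlen0 : ((rem0.length : Int)) = hi + 1 - lo := by
      rw [hrem0, List.length_map, PySem.List.length_pyRange_one]
      omega
    have hget0 : ∀ j : Nat, (j : Int) < hi + 1 - lo → rem0.getD j 0 = lo + j := by
      intro j hj
      rw [hrem0]
      have hjlen : j < ((PySem.List.pyRange lo (hi + 1) 1).map (fun x => |x|)).length := by
        rw [List.length_map, PySem.List.length_pyRange_one]
        omega
      rw [List.getD_eq_getElem _ _ hjlen, List.getElem_map, PySem.List.getElem_pyRange_one]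
      exact abs_of_pos (by omega)
    have hinv0 : ∀ j : Nat, (j : Int) < hi + 1 - lo →
        1 ≤ rem0.getD j 0 ∧ rem0.getD j 0 ∣ (lo + j) := by
      intro j hj
      rw [hget0 j hj]
      exact ⟨by omega, dvd_rfl⟩
    obtain ⟨L1, L2, L3, L4⟩ := primes_fold lo hi T hlo hle primes
      (fun p hp => ((hprmem p).mp hp).2.2) rem0 PySem.Set.empty hlen0 hinv0
      (by simp [PySem.Set.empty])
    rw [← hst] at L1 L2 L3 L4
    -- B-side membership
    have hBmem : ∀ q : Int, q ∈ fnd ↔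
        (PrI q ∧ T ≤ q ∧ ∃ x : Int, lo ≤ x ∧ x ≤ hi ∧ q ∣ x) := by
      intro q
      rw [hfnd, mem_leftover_fold, L3 q]
      have hempty : q ∉ (PySem.Set.empty : PySem.Set Int) := by simp [PySem.Set.empty]
      constructor
      · rintro ((h | ⟨hqp, hqT, y, hy1, hy2, hyd⟩) | ⟨hqm, h1q, hqT⟩)
        · exact absurd h hempty
        · exact ⟨((hprmem q).mp hqp).2.2, hqT, y, hy1, hy2, hyd⟩
        · obtain ⟨j, hjlen, hjq⟩ := List.mem_iff_getElem.mp hqm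
          have hjlt : (j : Int) < hi + 1 - lo := by
            have := L1
            omega
          have hgd : st.1.getD j 0 = q := by
            rw [List.getD_eq_getElem _ _ hjlen, hjq]
          rw [L2 j hjlt, hget0 j hjlt] at hgd
          have hchar := leftover_char s hi primes hs.1 hprmem hs.2.2 (lo + j) (by omega)
            (by omega) q h1q
          obtain ⟨hqP, hqs, hqd⟩ := hchar.mp hgd
          exact ⟨hqP, hqT, lo + j, by omega, by omega, hqd⟩
      · rintro ⟨hqP, hqT, x, hx1, hx2, hxd⟩
        by_cases hqs : q ≤ s
        · exact Or.inl (Or.inr ⟨(hprmem q).mpr ⟨hqP.1, hqs, hqP⟩, hqT, x, hx1, hx2, hxd⟩)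
        · right
          push_neg at hqs
          set j := (x - lo).toNat with hjdef
          have hjlt : (j : Int) < hi + 1 - lo := by omega
          have hljx : lo + (j : Int) = x := by omega
          have hgd : st.1.getD j 0 = q := by
            rw [L2 j hjlt, hget0 j hjlt, hljx]
            exact (leftover_char s hi primes hs.1 hprmem hs.2.2 x (by omega) (by omega) q
              (by have := hqP.1; omega)).mpr ⟨hqP, hqs, hxd⟩
          have hjlen : j < st.1.length := by
            have := L1
            omega
          refine ⟨List.mem_iff_getElem.mpr ⟨j, hjlen, ?_⟩, by have := hqP.1; omega, hqT⟩
          rw [← List.getD_eq_getElem _ 0 hjlen]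
          exact hgd
    -- A-side membership
    have hAmem : ∀ q : Int, q ∈ u ↔
        (PrI q ∧ T ≤ q ∧ ∃ x : Int, lo ≤ x ∧ x ≤ hi ∧ q ∣ x) := by
      intro q
      rw [hu, mem_foldl_union]
      have hempty : q ∉ (PySem.Set.empty : PySem.Set Int) := by simp [PySem.Set.empty]
      constructor
      · rintro (h | ⟨x, hxm, hq⟩)
        · exact absurd h hempty
        · have hxb := PySem.List.mem_pyRange_one.mp hxm
          have := (pvApf_mem k x (by omega) q).mp hq
          exact ⟨this.2.1, this.1, x, by omega, by omega, this.2.2⟩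
      · rintro ⟨hqP, hqT, x, hx1, hx2, hxd⟩
        refine Or.inr ⟨x, PySem.List.mem_pyRange_one.mpr ⟨by omega, by omega⟩, ?_⟩
        exact (pvApf_mem k x (by omega) q).mpr ⟨hqT, hqP, hxd⟩
    -- nodups
    have hNu : u.Nodup := by
      rw [hu]
      exact nodup_foldl_union k _ _ (by simp [PySem.Set.empty])
    have hNf : fnd.Nodup := by
      rw [hfnd]
      exact nodup_leftover_fold T _ _ L4
    apply (PySem.List.sorted_id_eq_sorted_id_iff_perm u fnd).mpr
    apply (List.perm_ext_iff_of_nodup hNu hNf).mpr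
    intro q
    rw [hAmem q, hBmem q]

-- ===== VERDICT (by name: the statement is the Claim_ definition above) =====
theorem unique_primes_spec : Claim_equal_unique_primes := by
  intro start n k _hD hPre
  unfold Spec_unique_primes
  exact main_eq start n k hPre
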